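-- pv_equiv track=rewrite | github.com/kwang111/ps5 | model.py | add_features_repayment_term
-- ===== SOURCE A (Python) =====
-- def add_features_repayment_term(loans, interval):
-- 	new_features = []
-- 	for loan in loans:
-- 		loan_dict = loan[0]
-- 		for amt in range (4, 28, interval):
-- 			label = 'repayment_term_' + str(amt) + '-' + str(amt+interval)
-- 			if(loan_dict['repayment_term'] >= amt) and (loan_dict['repayment_term'] < amt + interval):
-- 				loan_dict.update({label:1})
-- 			else:
-- 				loan_dict.update({label:0})
-- 		if(loan_dict['repayment_term'] >= 28):
-- 			loan_dict.update({'repayment_term_28+':1})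
-- 		else:
-- 			loan_dict.update({'repayment_term_28+':0})
--
-- 	for amt in range (4, 28, interval):
-- 		label = 'repayment_term_' + str(amt) + '-' + str(amt+interval)
-- 		new_features.append(label)
-- 	new_features.append('repayment_term_28+')
--
-- 	return loans, new_features
-- ===== SOURCE B (Python) =====
-- def add_features_repayment_term(loans, interval):
-- 	labels = ['repayment_term_' + str(a) + '-' + str(a + interval)
-- 			  for a in range(4, 28, interval)]
-- 	for loan in loans:
-- 		d = loan[0]
-- 		t = d['repayment_term']
-- 		for lab in labels:
-- 			d[lab] = 0
-- 		if interval > 0 and t >= 4: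
-- 			amt = 4 + ((t - 4) // interval) * interval
-- 			if amt < 28:
-- 				d['repayment_term_' + str(amt) + '-' + str(amt + interval)] = 1
-- 		d['repayment_term_28+'] = 1 if t >= 28 else 0
-- 	return loans, labels + ['repayment_term_28+']
-- ===== Notes on version B (the rewrite author's own statement) =====
-- stated objective: alternative
-- what changed: A tests every bin of range(4,28,interval) against the term with a comparison pair; B zeroes all bin labels and computes the single matching bin directly by integer arithmetic (4 + ((t-4)//interval)*interval), reading the term once, with the label list built once and reused for the returned feature names.
import Mathlib
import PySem

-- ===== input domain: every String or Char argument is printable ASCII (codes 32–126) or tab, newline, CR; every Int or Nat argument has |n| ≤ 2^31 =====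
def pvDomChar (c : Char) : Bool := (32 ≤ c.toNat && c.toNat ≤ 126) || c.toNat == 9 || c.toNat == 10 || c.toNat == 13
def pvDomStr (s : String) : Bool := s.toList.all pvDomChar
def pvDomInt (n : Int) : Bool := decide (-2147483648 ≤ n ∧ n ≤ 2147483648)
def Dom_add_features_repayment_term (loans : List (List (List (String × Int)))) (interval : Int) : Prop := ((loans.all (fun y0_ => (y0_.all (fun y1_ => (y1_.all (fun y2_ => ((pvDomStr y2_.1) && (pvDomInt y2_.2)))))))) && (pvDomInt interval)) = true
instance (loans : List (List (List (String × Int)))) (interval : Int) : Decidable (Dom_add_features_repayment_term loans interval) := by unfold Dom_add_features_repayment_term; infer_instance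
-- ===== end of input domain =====

-- B replaces A's per-bin membership test by integer arithmetic: zero every bin label, then compute the single
-- matching bin directly as 4 + ((t-4)//interval)*interval. Both versions mutate the loan dicts in place in Python;
-- the theorems here are about the returned value (which contains the mutated dicts).

-- ===== PORT A =====
-- label helper shared by both ports: 'repayment_term_' + str(amt) + '-' + str(amt+interval)
def pvLabel (interval amt : Int) : String :=
  "repayment_term_" ++ PySem.Int.toStr amt ++ "-" ++ PySem.Int.toStr (amt + interval)

def pvProcA (interval : Int) (loan : List (List (String × Int))) : List (List (String × Int)) :=
  match loan with
  | [] => []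
  | l0 :: rest =>
    let d0 := PySem.Dict.ofList l0
    let d1 := (PySem.List.pyRange 4 28 interval).foldl (fun d amt =>
      if d.getD "repayment_term" 0 ≥ amt ∧ d.getD "repayment_term" 0 < amt + interval
      then d.insert (pvLabel interval amt) 1
      else d.insert (pvLabel interval amt) 0) d0
    let d2 := if d1.getD "repayment_term" 0 ≥ 28
      then d1.insert "repayment_term_28+" 1
      else d1.insert "repayment_term_28+" 0
    d2.items :: rest

def add_features_repayment_term (loans : List (List (List (String × Int)))) (interval : Int) : (List (List (List (String × Int)))) × List String :=
  (loans.map (pvProcA interval),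
   ((PySem.List.pyRange 4 28 interval).foldl (fun acc amt => acc ++ [pvLabel interval amt]) [])
     ++ ["repayment_term_28+"])

-- ===== PORT B =====
def pvProcB (interval : Int) (labels : List String) (loan : List (List (String × Int))) : List (List (String × Int)) :=
  match loan with
  | [] => []
  | l0 :: rest =>
    let d0 := PySem.Dict.ofList l0
    let t := d0.getD "repayment_term" 0
    let d1 := labels.foldl (fun d lab => d.insert lab 0) d0
    let d2 := if 0 < interval ∧ 4 ≤ t then
        (let amt := 4 + PySem.Int.floordiv (t - 4) interval * interval
         if amt < 28 then d1.insert (pvLabel interval amt) 1 else d1)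
      else d1
    let d3 := d2.insert "repayment_term_28+" (if 28 ≤ t then 1 else 0)
    d3.items :: rest

def add_features_repayment_term_alt (loans : List (List (List (String × Int)))) (interval : Int) : (List (List (List (String × Int)))) × List String :=
  let labels := (PySem.List.pyRange 4 28 interval).map (pvLabel interval)
  (loans.map (pvProcB interval labels), labels ++ ["repayment_term_28+"])

-- ===== PRECONDITION & SPEC =====
-- Pre_ excludes exactly the inputs where Python A raises: interval = 0 (range ValueError), an empty loan
-- (loan[0] IndexError) and a first dict without key 'repayment_term' (KeyError).
def Pre_add_features_repayment_term (loans : List (List (List (String × Int)))) (interval : Int) : Prop :=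
  interval ≠ 0 ∧ ∀ loan ∈ loans, loan ≠ [] ∧ (PySem.Dict.ofList (loan.headD [])).contains "repayment_term" = true
instance (loans : List (List (List (String × Int)))) (interval : Int) : Decidable (Pre_add_features_repayment_term loans interval) := by unfold Pre_add_features_repayment_term; infer_instance

def pvWitness_add_features_repayment_term : (List (List (List (String × Int)))) × Int :=
  ([[[("repayment_term", 10)]], [[("repayment_term", 30), ("x", 1)], [("y", 2)]]], 6)

def Spec_add_features_repayment_term (loans : List (List (List (String × Int)))) (interval : Int) (out : (List (List (List (String × Int)))) × List String) : Prop := out = add_features_repayment_term_alt loans interval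
instance (loans : List (List (List (String × Int)))) (interval : Int) (out : (List (List (List (String × Int)))) × List String) : Decidable (Spec_add_features_repayment_term loans interval out) := by unfold Spec_add_features_repayment_term; infer_instance

-- ===== CLAIM (what is proved, stated in full; the proofs are below) =====
def Claim_equal_add_features_repayment_term : Prop := ∀ (loans : List (List (List (String × Int)))) (interval : Int), Dom_add_features_repayment_term loans interval → Pre_add_features_repayment_term loans interval → Spec_add_features_repayment_term loans interval (add_features_repayment_term loans interval)

-- ===== LEMMAS AND PROOFS =====

-- pvLabel is never the key 'repayment_term' (its char list is strictly longer)
lemma pvLabel_ne_key (interval amt : Int) : pvLabel interval amt ≠ "repayment_term" := by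
  intro h
  have h' := congrArg (fun s => s.toList.length) h
  simp [pvLabel, String.toList_append, PySem.Int.toList_toStr] at h'

-- str(n) is '-'-free and injective on 0 ≤ n < 28 (the possible bin starts)
lemma toChars_no_dash : ∀ n : Nat, n < 28 → '-' ∉ PySem.Int.toChars ((n : Nat) : Int) := by decide

lemma toChars_inj_small : ∀ m : Nat, m < 28 → ∀ n : Nat, n < 28 →
    PySem.Int.toChars ((m : Nat) : Int) = PySem.Int.toChars ((n : Nat) : Int) → m = n := by decide

lemma append_cons_inj {c : Char} :
    ∀ (x y u v : List Char), c ∉ x → c ∉ y → x ++ c :: u = y ++ c :: v → x = y := by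
  intro x
  induction x with
  | nil =>
    intro y u v _ hy h
    cases y with
    | nil => rfl
    | cons d y' =>
      simp at h
      exact absurd (h.1 ▸ List.mem_cons_self) hy
  | cons d x' ih =>
    intro y u v hx hy h
    cases y with
    | nil =>
      simp at h
      exact absurd (h.1 ▸ List.mem_cons_self) hx
    | cons e y' =>
      simp at h
      obtain ⟨rfl, h2⟩ := h
      have := ih y' u v (fun hm => hx (List.mem_cons_of_mem _ hm)) (fun hm => hy (List.mem_cons_of_mem _ hm)) h2
      rw [this]

lemma pvLabel_inj (interval : Int) {a b : Int} (ha4 : 4 ≤ a) (ha : a < 28)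
    (hb4 : 4 ≤ b) (hb : b < 28) (hne : a ≠ b) : pvLabel interval a ≠ pvLabel interval b := by
  intro h
  have h' := congrArg String.toList h
  simp only [pvLabel, String.toList_append, PySem.Int.toList_toStr] at h'
  simp only [List.append_assoc] at h'
  have h2 := List.append_cancel_left h'
  have hda : ("-" : String).toList = ['-'] := by decide
  rw [hda] at h2
  simp only [List.cons_append, List.nil_append] at h2
  have hacast : a = ((a.toNat : Nat) : Int) := by omega
  have hbcast : b = ((b.toNat : Nat) : Int) := by omega
  rw [hacast, hbcast] at h2
  have hinj := toChars_inj_small a.toNat (by omega) b.toNat (by omega)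
    (append_cons_inj _ _ _ _ (toChars_no_dash a.toNat (by omega)) (toChars_no_dash b.toNat (by omega)) h2)
  omega

-- A's dynamic read of loan_dict['repayment_term'] inside the loop equals its initial value t
lemma fold_dyn_eq_static (interval t : Int) :
    ∀ (bins : List Int) (d : PySem.Dict String Int),
      d.getD "repayment_term" 0 = t →
      bins.foldl (fun d amt =>
        if d.getD "repayment_term" 0 ≥ amt ∧ d.getD "repayment_term" 0 < amt + interval
        then d.insert (pvLabel interval amt) 1
        else d.insert (pvLabel interval amt) 0) d
      = bins.foldl (fun d amt =>
          d.insert (pvLabel interval amt) (if amt ≤ t ∧ t < amt + interval then 1 else 0)) d := by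
  intro bins
  induction bins with
  | nil => intro d _; rfl
  | cons amt bins ih =>
    intro d ht
    simp only [List.foldl_cons, ht, ge_iff_le]
    by_cases hc : amt ≤ t ∧ t < amt + interval
    · rw [if_pos hc, if_pos hc,
        ih _ (by rw [PySem.Dict.getD_insert_of_ne _ _ _ (Ne.symm (pvLabel_ne_key interval amt))]; exact ht)]
    · rw [if_neg hc, if_neg hc,
        ih _ (by rw [PySem.Dict.getD_insert_of_ne _ _ _ (Ne.symm (pvLabel_ne_key interval amt))]; exact ht)]

-- inserting only at bin labels leaves the key 'repayment_term' unchanged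
lemma getD_fold_label (interval : Int) (v : Int → Int) :
    ∀ (l : List Int) (d : PySem.Dict String Int),
      (l.foldl (fun d a => d.insert (pvLabel interval a) (v a)) d).getD "repayment_term" 0
        = d.getD "repayment_term" 0 := by
  intro l
  induction l with
  | nil => intro d; rfl
  | cons a l ih =>
    intro d
    simp only [List.foldl_cons, ih, PySem.Dict.getD_insert_of_ne _ _ _ (Ne.symm (pvLabel_ne_key interval a))]

lemma contains_fold_label (interval : Int) (v : Int → Int) (k : String) :
    ∀ (l : List Int) (d : PySem.Dict String Int), d.contains k = true →
      (l.foldl (fun d a => d.insert (pvLabel interval a) (v a)) d).contains k = true := by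
  intro l
  induction l with
  | nil => intro d h; exact h
  | cons a l ih =>
    intro d h
    simp only [List.foldl_cons]
    exact ih _ (by rw [PySem.Dict.contains_insert]; simp [h])

-- two inserts at distinct keys commute when the first key is already present (items-level equality)
lemma insert_comm_of_contains (d : PySem.Dict String Int) {k k' : String} (v w : Int)
    (hc : d.contains k = true) (hne : k' ≠ k) :
    (d.insert k v).insert k' w = (d.insert k' w).insert k v := by
  apply PySem.Dict.ext
  by_cases hc' : d.contains k' = true
  · rw [PySem.Dict.items_insert_of_contains _ _ (by rw [PySem.Dict.contains_insert]; simp [hc']),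
      PySem.Dict.items_insert_of_contains _ _ hc,
      PySem.Dict.items_insert_of_contains _ _ (by rw [PySem.Dict.contains_insert]; simp [hc]),
      PySem.Dict.items_insert_of_contains _ _ hc', List.map_map, List.map_map]
    apply List.map_congr_left
    intro p _
    by_cases h1 : p.1 = k <;> by_cases h2 : p.1 = k' <;>
      simp [Function.comp, h1, h2, hne, Ne.symm hne] <;> omega
  · simp only [Bool.not_eq_true] at hc'
    rw [PySem.Dict.items_insert_of_not_contains _ _
        (by rw [PySem.Dict.contains_insert]; simp [hc', hne]),
      PySem.Dict.items_insert_of_contains _ _ hc,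
      PySem.Dict.items_insert_of_contains _ _ (by rw [PySem.Dict.contains_insert]; simp [hc]),
      PySem.Dict.items_insert_of_not_contains _ _ hc']
    rw [List.map_append]
    simp [hne]

-- B's final overwrite with 1 equals A's in-place insert of 1 followed by the remaining zero inserts
lemma zfold_insert_one (interval : Int) (k : String) (post : List Int)
    (hpost : ∀ a ∈ post, pvLabel interval a ≠ k) (e : PySem.Dict String Int) :
    post.foldl (fun d a => d.insert (pvLabel interval a) 0) (e.insert k 1)
      = (post.foldl (fun d a => d.insert (pvLabel interval a) 0) (e.insert k 0)).insert k 1 := by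
  induction post using List.reverseRecOn with
  | nil => simp [PySem.Dict.insert_insert_self]
  | append_singleton post b ih =>
    rw [List.foldl_append, List.foldl_append,
      ih (fun a ha => hpost a (List.mem_append_left _ ha))]
    simp only [List.foldl_cons, List.foldl_nil]
    exact insert_comm_of_contains _ _ _
      (contains_fold_label interval (fun _ => 0) k post _
        (by rw [PySem.Dict.contains_insert]; simp))
      (hpost b (by simp))

-- arithmetic characterisation of A's bin test on the bins of range(4, 28, interval)
lemma hit_iff {interval t amt : Int} (hi : 0 < interval) (h4a : 4 ≤ amt) (hd : interval ∣ amt - 4) :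
    (amt ≤ t ∧ t < amt + interval) ↔
      (4 ≤ t ∧ amt = 4 + PySem.Int.floordiv (t - 4) interval * interval) := by
  obtain ⟨q, hq⟩ := hd
  constructor
  · rintro ⟨h1, h2⟩
    have h4 : 4 ≤ t := by linarith
    refine ⟨h4, ?_⟩
    have : PySem.Int.floordiv (t - 4) interval = q := by
      rw [PySem.Int.floordiv_eq_iff_of_pos hi]
      constructor <;> nlinarith
    rw [this]; linarith [hq]
  · rintro ⟨h4, hamt⟩
    have hfd := (PySem.Int.floordiv_eq_iff_of_pos (a := t - 4) (b := interval) hi).mp rfl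
    constructor <;> nlinarith [hfd.1, hfd.2]

lemma floordiv_nonneg_of_le {t interval : Int} (hi : 0 < interval) (h4 : 4 ≤ t) :
    0 ≤ PySem.Int.floordiv (t - 4) interval := by
  have hfd := (PySem.Int.floordiv_eq_iff_of_pos (a := t - 4) (b := interval) hi).mp rfl
  by_contra h
  push_neg at h
  nlinarith [hfd.1, hfd.2]

lemma pyRange_nodup {interval : Int} (hi : 0 < interval) :
    (PySem.List.pyRange 4 28 interval).Nodup := by
  rw [PySem.List.pyRange_of_pos _ _ hi]
  refine List.Nodup.map ?_ (List.nodup_range)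
  intro x y h
  have : interval * (x : Int) = interval * (y : Int) := by linarith
  have := mul_left_cancel₀ (by omega : interval ≠ 0) this
  exact_mod_cast this

lemma pyRange_nil_of_neg {interval : Int} (h : interval < 0) :
    PySem.List.pyRange 4 28 interval = [] := by
  simp [PySem.List.pyRange]; omega

-- the dict built by A's bin loop equals the dict built by B's zeroing pass plus its single overwrite
lemma dicts_eq (interval : Int) (hi : interval ≠ 0) (t : Int) (d0 : PySem.Dict String Int) :
    (PySem.List.pyRange 4 28 interval).foldl (fun d amt =>
        d.insert (pvLabel interval amt) (if amt ≤ t ∧ t < amt + interval then 1 else 0)) d0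
      = (if 0 < interval ∧ 4 ≤ t then
          (let amt := 4 + PySem.Int.floordiv (t - 4) interval * interval
           if amt < 28 then
             ((PySem.List.pyRange 4 28 interval).foldl (fun d a => d.insert (pvLabel interval a) 0) d0).insert (pvLabel interval amt) 1
           else (PySem.List.pyRange 4 28 interval).foldl (fun d a => d.insert (pvLabel interval a) 0) d0)
        else (PySem.List.pyRange 4 28 interval).foldl (fun d a => d.insert (pvLabel interval a) 0) d0) := by
  rcases lt_or_gt_of_ne hi with hneg | hpos
  · rw [pyRange_nil_of_neg hneg]
    simp [not_and_of_not_left _ (by omega : ¬ 0 < interval)]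
  · have hmem : ∀ x : Int, x ∈ PySem.List.pyRange 4 28 interval ↔ 4 ≤ x ∧ x < 28 ∧ interval ∣ x - 4 :=
      fun x => PySem.List.mem_pyRange_iff_of_pos hpos x
    by_cases hfire : 4 ≤ t ∧ 4 + PySem.Int.floordiv (t - 4) interval * interval < 28
    · obtain ⟨h4t, hlt⟩ := hfire
      set amt : Int := 4 + PySem.Int.floordiv (t - 4) interval * interval with hamt
      have h4a : 4 ≤ amt := by
        have h1 := floordiv_nonneg_of_le hpos h4t
        have h2 : 0 ≤ PySem.Int.floordiv (t - 4) interval * interval :=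
          mul_nonneg h1 (le_of_lt hpos)
        omega
      have hmem_amt : amt ∈ PySem.List.pyRange 4 28 interval :=
        (hmem amt).mpr ⟨h4a, hlt, ⟨PySem.Int.floordiv (t - 4) interval, by ring⟩⟩
      obtain ⟨pre, post, hsplit⟩ := List.append_of_mem hmem_amt
      have hnd := pyRange_nodup hpos
      rw [hsplit] at hnd
      have hnpre : amt ∉ pre := by
        intro h; exact (List.disjoint_of_nodup_append hnd) h (by simp)
      have hnpost : amt ∉ post := by
        have h1 : (amt :: post).Nodup := (List.nodup_append.mp hnd).2.1
        exact (List.nodup_cons.mp h1).1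
      have hbnd : ∀ a ∈ PySem.List.pyRange 4 28 interval,
          4 ≤ a ∧ a < 28 ∧ interval ∣ a - 4 := fun a ha => (hmem a).mp ha
      have hcond : ∀ a ∈ PySem.List.pyRange 4 28 interval,
          ((a ≤ t ∧ t < a + interval) ↔ a = amt) := by
        intro a ha
        obtain ⟨ha4, _, hdvd⟩ := hbnd a ha
        rw [hit_iff hpos ha4 hdvd]
        exact ⟨fun h => h.2, fun h => ⟨h4t, h⟩⟩
      rw [if_pos ⟨hpos, h4t⟩]
      simp only [if_pos hlt]
      rw [hsplit, List.foldl_append, List.foldl_append, List.foldl_cons, List.foldl_cons]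
      have hpre0 : List.foldl (fun d a =>
            d.insert (pvLabel interval a) (if a ≤ t ∧ t < a + interval then 1 else 0)) d0 pre
          = List.foldl (fun d a => d.insert (pvLabel interval a) 0) d0 pre := by
        apply PySem.List.foldl_congr_mem
        intro acc x hx
        rw [if_neg]
        intro hcx
        have hxa : x = amt := (hcond x (by rw [hsplit]; simp [hx])).mp hcx
        exact hnpre (hxa ▸ hx)
      have hamt1 : (if amt ≤ t ∧ t < amt + interval then (1:Int) else 0) = 1 := by
        rw [if_pos ((hcond amt hmem_amt).mpr rfl)]
      rw [hpre0, hamt1]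
      have hpost0 : ∀ e : PySem.Dict String Int, List.foldl (fun d a =>
            d.insert (pvLabel interval a) (if a ≤ t ∧ t < a + interval then 1 else 0)) e post
          = List.foldl (fun d a => d.insert (pvLabel interval a) 0) e post := by
        intro e
        apply PySem.List.foldl_congr_mem
        intro acc x hx
        rw [if_neg]
        intro hcx
        have hxa : x = amt := (hcond x (by rw [hsplit]; simp [hx])).mp hcx
        exact hnpost (hxa ▸ hx)
      rw [hpost0]
      refine zfold_insert_one interval (pvLabel interval amt) post ?_ _
      intro a ha
      obtain ⟨ha4, ha28, _⟩ := hbnd a (by rw [hsplit]; simp [ha])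
      exact pvLabel_inj interval ha4 ha28 h4a hlt (fun h => hnpost (h ▸ ha))
    · have hnohit : ∀ a ∈ PySem.List.pyRange 4 28 interval,
          ¬ (a ≤ t ∧ t < a + interval) := by
        intro a ha hc
        obtain ⟨ha4, ha28, hdvd⟩ := (hmem a).mp ha
        obtain ⟨h4t, heq⟩ := (hit_iff hpos ha4 hdvd).mp hc
        exact hfire ⟨h4t, heq ▸ ha28⟩
      have hA : List.foldl (fun d amt =>
            d.insert (pvLabel interval amt) (if amt ≤ t ∧ t < amt + interval then 1 else 0)) d0
            (PySem.List.pyRange 4 28 interval)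
          = List.foldl (fun d a => d.insert (pvLabel interval a) 0) d0
            (PySem.List.pyRange 4 28 interval) := by
        apply PySem.List.foldl_congr_mem
        intro acc x hx
        rw [if_neg (hnohit x hx)]
      rw [hA]
      by_cases hct : 0 < interval ∧ 4 ≤ t
      · rw [if_pos hct]
        simp only
        rw [if_neg (fun hlt => hfire ⟨hct.2, hlt⟩)]
      · rw [if_neg hct]

-- the per-loan transformations agree (only interval ≠ 0 is needed)
lemma proc_eq (interval : Int) (hi : interval ≠ 0) (loan : List (List (String × Int))) :
    pvProcA interval loan
      = pvProcB interval ((PySem.List.pyRange 4 28 interval).map (pvLabel interval)) loan := by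
  cases loan with
  | nil => rfl
  | cons l0 rest =>
    unfold pvProcA pvProcB
    simp only [List.foldl_map]
    set d0 := PySem.Dict.ofList l0 with hd0
    set t := d0.getD "repayment_term" 0 with ht
    rw [fold_dyn_eq_static interval t _ d0 rfl]
    rw [dicts_eq interval hi t d0]
    set dB := (if 0 < interval ∧ 4 ≤ t then
          (let amt := 4 + PySem.Int.floordiv (t - 4) interval * interval
           if amt < 28 then
             ((PySem.List.pyRange 4 28 interval).foldl (fun d a => d.insert (pvLabel interval a) 0) d0).insert (pvLabel interval amt) 1
           else (PySem.List.pyRange 4 28 interval).foldl (fun d a => d.insert (pvLabel interval a) 0) d0)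
        else (PySem.List.pyRange 4 28 interval).foldl (fun d a => d.insert (pvLabel interval a) 0) d0) with hdB
    have hgd : dB.getD "repayment_term" 0 = t := by
      rw [hdB]
      by_cases h1 : 0 < interval ∧ 4 ≤ t
      · simp only [if_pos h1]
        by_cases h2 : 4 + PySem.Int.floordiv (t - 4) interval * interval < 28
        · simp only [if_pos h2]
          rw [PySem.Dict.getD_insert_of_ne _ _ _ (Ne.symm (pvLabel_ne_key interval _))]
          exact getD_fold_label interval (fun _ => 0) _ d0
        · simp only [if_neg h2]
          exact getD_fold_label interval (fun _ => 0) _ d0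
      · simp only [if_neg h1]
        exact getD_fold_label interval (fun _ => 0) _ d0
    rw [hgd]
    by_cases h28 : t ≥ 28
    · rw [if_pos h28, if_pos (by omega : (28:Int) ≤ t)]
    · rw [if_neg h28, if_neg (by omega : ¬ (28:Int) ≤ t)]

-- ===== VERDICT (by name: the statement is the Claim_ definition above) =====
theorem add_features_repayment_term_spec : Claim_equal_add_features_repayment_term := by
  intro loans interval _ hpre
  unfold Spec_add_features_repayment_term add_features_repayment_term add_features_repayment_term_alt
  refine Prod.ext ?_ ?_
  · simp only
    exact List.map_congr_left fun loan _ => proc_eq interval hpre.1 loan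
  · simp only [PySem.List.foldl_append_singleton_eq_map, List.nil_append]
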